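-- pv_equiv track=rewrite | github.com/nialov/nix-extra | overlays/pyproject.py | modify_dependency
-- ===== SOURCE A (Python) =====
-- def modify_dependency(dependency: str):
--     last_index = None
--     for idx, character in enumerate(dependency):
--         if character in " >=":
--             last_index = idx
--             break
--
--     if last_index is None:
--         last_index = len(dependency)
--
--     return dependency[0:last_index]
-- ===== SOURCE B (Python) =====
-- def modify_dependency(dependency: str):
--     cuts = [i for i in (dependency.find(c) for c in " >=") if i != -1]
--     if cuts:
--         return dependency[:min(cuts)]
--     return dependency
-- ===== Notes on version B (the rewrite author's own statement) =====
-- stated objective: idiomatic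
-- what changed: Replaces the single indexed early-break character loop with three independent str.find scans (one per delimiter), keeping the hits and slicing at their minimum.
import Mathlib
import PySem

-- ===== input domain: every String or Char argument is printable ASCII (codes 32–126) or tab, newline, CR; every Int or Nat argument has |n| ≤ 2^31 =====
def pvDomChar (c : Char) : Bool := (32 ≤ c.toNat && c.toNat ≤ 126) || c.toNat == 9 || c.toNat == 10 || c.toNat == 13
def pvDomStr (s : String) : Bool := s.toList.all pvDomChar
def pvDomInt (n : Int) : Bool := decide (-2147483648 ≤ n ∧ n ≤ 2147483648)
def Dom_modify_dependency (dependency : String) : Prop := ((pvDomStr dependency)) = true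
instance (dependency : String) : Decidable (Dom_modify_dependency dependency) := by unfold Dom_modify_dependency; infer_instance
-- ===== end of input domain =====

-- B replaces A's single indexed early-break scan by three independent find scans (one
-- per delimiter) whose minimum hit position is the cut point; objective: idiomatic.


-- ===== PORT A =====
-- the 'for idx, character in enumerate(dependency): if character in " >=": break' loop
def pvALoop : List (Int × Char) → Option Int
  | [] => none
  | (idx, character) :: rest =>
      if PySem.Chars.isIn [character] [' ', '>', '='] then some idx else pvALoop rest

def modify_dependency (dependency : String) : String :=
  let last_index : Int :=
    match pvALoop (PySem.List.enumerate dependency.toList) with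
    | none => (dependency.toList.length : Int)   -- last_index = len(dependency)
    | some i => i
  String.ofList (PySem.List.slice dependency.toList (some 0) (some last_index))

-- ===== PORT B =====
def modify_dependency_alt (dependency : String) : String :=
  let cuts :=
    ([' ', '>', '='].map (fun c => PySem.Chars.find dependency.toList [c])).filter
      (fun i => !(i == -1))
  match PySem.List.min? cuts (fun x => x) with
  | some m => String.ofList (PySem.List.slice dependency.toList none (some m))
  | none => dependency

-- ===== PRECONDITION & SPEC =====
def Spec_modify_dependency (dependency : String) (out : String) : Prop := out = modify_dependency_alt dependency
instance (dependency : String) (out : String) : Decidable (Spec_modify_dependency dependency out) := by unfold Spec_modify_dependency; infer_instance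

-- ===== CLAIM (what is proved, stated in full; the proofs are below) =====
def Claim_equal_modify_dependency : Prop := ∀ (dependency : String), Dom_modify_dependency dependency → Spec_modify_dependency dependency (modify_dependency dependency)

-- ===== LEMMAS AND PROOFS =====

-- the delimiter test, as a Bool predicate on one character
def pvIsDelim (c : Char) : Bool := PySem.Chars.isIn [c] [' ', '>', '=']

theorem pvIsDelim_iff (c : Char) : pvIsDelim c = true ↔ c ∈ [' ', '>', '='] := by
  rw [pvIsDelim, PySem.Chars.isIn_iff_infix, List.singleton_infix_iff]

-- singleton prefix is the head
theorem pv_singleton_prefix (c : Char) (cs : List Char) : [c] <+: cs ↔ cs.head? = some c := by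
  cases cs with
  | nil => simp
  | cons d t =>
      simp only [List.cons_prefix_cons, List.nil_prefix, and_true, List.head?_cons,
        Option.some.injEq]
      exact ⟨fun h => h.symm, fun h => h.symm⟩

-- find of a single character: -1 exactly when the character is absent
theorem pv_find_eq_neg_one (cs : List Char) (c : Char) :
    PySem.Chars.find cs [c] = -1 ↔ c ∉ cs := by
  rw [PySem.Chars.find_eq_neg_one_iff, List.singleton_infix_iff]

-- find of a single character, when it hits: position of the FIRST occurrence
theorem pv_find_spec (cs : List Char) (c : Char) (h : PySem.Chars.find cs [c] ≠ -1) :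
    0 ≤ PySem.Chars.find cs [c] ∧
    (PySem.Chars.find cs [c]).toNat < cs.length ∧
    cs[(PySem.Chars.find cs [c]).toNat]? = some c ∧
    ∀ i < (PySem.Chars.find cs [c]).toNat, cs[i]? ≠ some c := by
  have hmem : c ∈ cs := by
    by_contra hm
    exact h ((pv_find_eq_neg_one cs c).mpr hm)
  have hpos : 0 ≤ PySem.Chars.find cs [c] := by
    rw [PySem.Chars.find_nonneg_iff, List.singleton_infix_iff]; exact hmem
  obtain ⟨hpre, hmin⟩ := PySem.Chars.find_spec (s := cs) (sub := [c]) hpos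
  rw [pv_singleton_prefix, List.head?_drop] at hpre
  refine ⟨hpos, ?_, hpre, ?_⟩
  · by_contra hge
    rw [List.getElem?_eq_none (by omega)] at hpre
    simp at hpre
  · intro i hi hc
    exact hmin i hi (by rw [pv_singleton_prefix, List.head?_drop]; exact hc)

-- A's loop is findIdx? over the enumerated list
theorem pvALoop_eq (cs : List Char) (s : Int) :
    pvALoop (PySem.List.enumerate cs s) =
      Option.map (fun k : Nat => s + (k : Int)) (cs.findIdx? pvIsDelim) := by
  induction cs generalizing s with
  | nil => simp [pvALoop, PySem.List.enumerate_nil]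
  | cons d t ih =>
      rw [PySem.List.enumerate_cons, List.findIdx?_cons]
      simp only [pvALoop, pvIsDelim]
      by_cases hd : PySem.Chars.isIn [d] [' ', '>', '='] = true
      · simp [hd]
      · rw [if_neg hd, if_neg hd, ih (s + 1)]
        cases h : t.findIdx? pvIsDelim
        · simp
        · simp only [Option.map_some, Option.some.injEq]
          push_cast
          ring

-- elements of B's cuts list
theorem pv_mem_cuts (cs : List Char) (x : Int) :
    x ∈ ([' ', '>', '='].map (fun c => PySem.Chars.find cs [c])).filter (fun i => !(i == -1)) ↔
      ∃ c ∈ [' ', '>', '='], PySem.Chars.find cs [c] = x ∧ x ≠ -1 := by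
  simp only [List.mem_filter, List.mem_map]
  constructor
  · rintro ⟨⟨c, hc, rfl⟩, hne⟩
    exact ⟨c, hc, rfl, by simpa using hne⟩
  · rintro ⟨c, hc, rfl, hne⟩
    exact ⟨⟨c, hc, rfl⟩, by simpa using hne⟩

-- main fact: the two cut computations agree
theorem pv_main (dependency : String) :
    modify_dependency dependency = modify_dependency_alt dependency := by
  unfold modify_dependency modify_dependency_alt
  rw [pvALoop_eq dependency.toList 0]
  set cs := dependency.toList with hcs
  set cuts := ([' ', '>', '='].map (fun c => PySem.Chars.find cs [c])).filter (fun i => !(i == -1)) with hcuts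
  cases hfi : cs.findIdx? pvIsDelim with
  | none =>
      -- no delimiter occurs: every find is -1, cuts is empty, both return the whole string
      have hnone := List.findIdx?_eq_none_iff.mp hfi
      have hempty : cuts = [] := by
        rw [hcuts, List.filter_eq_nil_iff]
        intro x hx
        obtain ⟨c, hc, rfl⟩ := List.mem_map.mp hx
        have : c ∉ cs := by
          intro hmem
          have hf := hnone c hmem
          have hcd := (pvIsDelim_iff c).mpr hc
          simp [hf] at hcd
        simp [(pv_find_eq_neg_one cs c).mpr this]
      rw [hempty]
      simp [PySem.List.min?, PySem.List.slice_to_natCast, hcs]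
      rw [← String.length_toList, List.take_length]
      simp
  | some n =>
      -- the first delimiter sits at n
      obtain ⟨hn, hidx⟩ := List.findIdx?_eq_some_iff_findIdx_eq.mp hfi
      have hpn : pvIsDelim cs[n] := by
        have h1 := List.findIdx_getElem (xs := cs) (p := pvIsDelim) (w := by omega)
        simpa [hidx] using h1
      have hmin_n : ∀ i (hilen : i < cs.length), i < n → ¬ pvIsDelim (cs[i]'hilen) := by
        intro i hilen hin hp
        have hle : cs.findIdx pvIsDelim ≤ i := by
          by_contra hgt
          exact absurd hp (by simpa using List.not_of_lt_findIdx (by omega : i < cs.findIdx pvIsDelim))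
        omega
      -- (a) every cut is ≥ n
      have ha : ∀ x ∈ cuts, (n : Int) ≤ x := by
        intro x hx
        obtain ⟨c, hc, rfl, hne⟩ := (pv_mem_cuts cs x).mp hx
        obtain ⟨h0, hlt, hat, -⟩ := pv_find_spec cs c hne
        have hck : cs[(PySem.Chars.find cs [c]).toNat] = c := by
          simpa [List.getElem?_eq_getElem hlt] using hat
        have : n ≤ (PySem.Chars.find cs [c]).toNat := by
          by_contra hgt
          exact hmin_n _ hlt (by omega) (by rw [hck, pvIsDelim_iff]; exact hc)
        omega
      -- (b) the find of the delimiter sitting at n is a cut and is ≤ n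
      have hb : ∃ x ∈ cuts, x ≤ (n : Int) := by
        have hc0d : cs[n] ∈ [' ', '>', '='] := (pvIsDelim_iff cs[n]).mp hpn
        have hc0mem : cs[n] ∈ cs := List.getElem_mem hn
        have hne : PySem.Chars.find cs [cs[n]] ≠ -1 := by
          rw [Ne, pv_find_eq_neg_one]; simp
        refine ⟨PySem.Chars.find cs [cs[n]], (pv_mem_cuts cs _).mpr ⟨cs[n], hc0d, rfl, hne⟩, ?_⟩
        obtain ⟨h0, hlt, hat, hbefore⟩ := pv_find_spec cs cs[n] hne
        have : (PySem.Chars.find cs [cs[n]]).toNat ≤ n := by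
          by_contra hgt
          exact hbefore n (by omega) (by rw [List.getElem?_eq_getElem hn])
        omega
      -- hence min? cuts = some n and both sides take the first n characters
      obtain ⟨x0, hx0, hx0n⟩ := hb
      cases hm : PySem.List.min? cuts (fun x => x) with
      | none =>
          rw [PySem.List.min?_eq_none_iff] at hm
          rw [hm] at hx0; exact absurd hx0 (List.not_mem_nil)
      | some m =>
          have hmem := PySem.List.min?_mem hm
          have hmle := PySem.List.min?_isMin hm
          have hmn : m = (n : Int) := le_antisymm (le_trans (hmle x0 hx0) hx0n) (ha m hmem)
          subst hmn
          simp [hm, PySem.List.slice_to_natCast]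

-- ===== VERDICT (by name: the statement is the Claim_ definition above) =====
theorem modify_dependency_spec : Claim_equal_modify_dependency := by
  intro dependency _
  exact pv_main dependency
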